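-- pv_equiv track=rewrite | github.com/Leonnardo17/Trabajo1 | tp3/trabajo-practico definitivo(4).py | max_min_arrays
-- ===== SOURCE A (Python) =====
-- def max_min_arrays(dato, tipo):                     #funcion encargada de  ordenar el array que contiene los contadores de mayor a menor (necesita ser usada dos veces consecutivas)
--     for j in range(0,3):
--         for i in range (0,2):
--             if dato[i] < dato[i+1]:
--
--                 aux = dato[i]
--                 dato[i] = dato[i+1]
--                 dato[i+1]= aux
--
--                 aux = tipo[i]
--                 tipo[i] = tipo[i+1]
--                 tipo[i+1]= aux
--
--
--     return dato, tipo
-- ===== SOURCE B (Python) =====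
-- def max_min_arrays(dato, tipo):
--     # Stable descending sort of the first three (dato, tipo) pairs; written back in place like A.
--     p = sorted([(dato[0], tipo[0]), (dato[1], tipo[1]), (dato[2], tipo[2])],
--                key=lambda t: t[0], reverse=True)
--     for i in range(3):
--         dato[i], tipo[i] = p[i]
--     return dato, tipo
-- ===== Notes on version B (the rewrite author's own statement) =====
-- stated objective: idiomatic
-- what changed: Replaces the hand-written 3x2 bubble-sort swap loops by one stable sorted(..., key=first, reverse=True) over the three (dato,tipo) pairs, written back in place.
-- outside the precondition, e.g. on max_min_arrays([3, 2, 1], []): A returns ([3, 2, 1], []), B raises IndexError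
import Mathlib
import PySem

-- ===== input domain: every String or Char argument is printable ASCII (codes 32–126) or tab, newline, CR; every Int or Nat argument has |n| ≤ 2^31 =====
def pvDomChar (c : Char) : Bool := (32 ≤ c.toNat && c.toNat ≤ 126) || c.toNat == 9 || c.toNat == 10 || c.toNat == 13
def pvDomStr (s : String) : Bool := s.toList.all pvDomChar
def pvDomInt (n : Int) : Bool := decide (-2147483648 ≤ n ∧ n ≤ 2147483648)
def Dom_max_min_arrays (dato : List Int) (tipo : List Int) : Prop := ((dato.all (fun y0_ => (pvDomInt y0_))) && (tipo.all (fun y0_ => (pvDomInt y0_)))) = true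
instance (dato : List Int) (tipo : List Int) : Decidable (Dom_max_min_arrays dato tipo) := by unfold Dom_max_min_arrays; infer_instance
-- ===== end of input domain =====

-- B replaces A's hand-written 3x2 bubble-sort swap loops by one stable descending sort of the
-- three (dato, tipo) pairs (idiomatic); equivalence is about the RETURN value only — the Python A
-- mutates dato/tipo in place (B performs the same in-place writes).


-- ===== PORT A =====
-- one body of the inner loop: 'if dato[i] < dato[i+1]: swap dato[i],dato[i+1]; swap tipo[i],tipo[i+1]'
def pvBubStep (p : List Int × List Int) (i : Nat) : List Int × List Int :=
  if p.1.getD i 0 < p.1.getD (i+1) 0 then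
    let aux := p.1.getD i 0
    let d := (p.1.set i (p.1.getD (i+1) 0)).set (i+1) aux
    let aux2 := p.2.getD i 0
    let t := (p.2.set i (p.2.getD (i+1) 0)).set (i+1) aux2
    (d, t)
  else p

def max_min_arrays (dato : List Int) (tipo : List Int) : List Int × List Int :=
  (List.range 3).foldl (fun p _j => (List.range 2).foldl pvBubStep p) (dato, tipo)

-- ===== PORT B =====
def max_min_arrays_alt (dato : List Int) (tipo : List Int) : List Int × List Int :=
  let p := PySem.List.sorted
      [(dato.getD 0 0, tipo.getD 0 0), (dato.getD 1 0, tipo.getD 1 0), (dato.getD 2 0, tipo.getD 2 0)]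
      (fun t => t.1) true
  let d := ((dato.set 0 (p.getD 0 (0,0)).1).set 1 (p.getD 1 (0,0)).1).set 2 (p.getD 2 (0,0)).1
  let t := ((tipo.set 0 (p.getD 0 (0,0)).2).set 1 (p.getD 1 (0,0)).2).set 2 (p.getD 2 (0,0)).2
  (d, t)

-- ===== PRECONDITION & SPEC =====
-- Pre_ requires both lists to have length ≥ 3: shorter dato always makes A raise IndexError, and a
-- shorter tipo makes A raise whenever a swap fires; the corner where dato[0..2] is already
-- non-increasing and tipo is shorter (A returns both unchanged) is excluded because B's upfront
-- read of the three pairs raises there.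
def Pre_max_min_arrays (dato : List Int) (tipo : List Int) : Prop :=
  3 ≤ dato.length ∧ 3 ≤ tipo.length
instance (dato : List Int) (tipo : List Int) : Decidable (Pre_max_min_arrays dato tipo) := by unfold Pre_max_min_arrays; infer_instance
def pvWitness_max_min_arrays : List Int × List Int := ([1, 3, 2], [10, 20, 30])

def Spec_max_min_arrays (dato : List Int) (tipo : List Int) (out : List Int × List Int) : Prop := out = max_min_arrays_alt dato tipo
instance (dato : List Int) (tipo : List Int) (out : List Int × List Int) : Decidable (Spec_max_min_arrays dato tipo out) := by unfold Spec_max_min_arrays; infer_instance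

-- ===== CLAIM (what is proved, stated in full; the proofs are below) =====
def Claim_equal_max_min_arrays : Prop := ∀ (dato : List Int) (tipo : List Int), Dom_max_min_arrays dato tipo → Pre_max_min_arrays dato tipo → Spec_max_min_arrays dato tipo (max_min_arrays dato tipo)

-- ===== LEMMAS AND PROOFS =====
set_option maxHeartbeats 3200000 in
theorem max_min_arrays_core (a b c : Int) (dr : List Int) (x y z : Int) (tr : List Int) :
    max_min_arrays (a :: b :: c :: dr) (x :: y :: z :: tr)
      = max_min_arrays_alt (a :: b :: c :: dr) (x :: y :: z :: tr) := by
  by_cases h1 : a < b <;> by_cases h2 : b < a <;>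
  by_cases h3 : b < c <;> by_cases h4 : c < b <;>
  by_cases h5 : a < c <;> by_cases h6 : c < a <;>
  first
  | omega
  | simp [max_min_arrays, max_min_arrays_alt, pvBubStep,
      PySem.List.sorted_rev_eq_foldl_insertBy, PySem.List.insertBy,
      List.range_succ, List.getD, List.set, h1, h2, h3, h4, h5, h6]

-- ===== VERDICT (by name: the statement is the Claim_ definition above) =====
theorem max_min_arrays_spec : Claim_equal_max_min_arrays := by
  intro dato tipo _ hpre
  obtain ⟨hd, ht⟩ := hpre
  match dato, tipo with
  | a :: b :: c :: dr, x :: y :: z :: tr =>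
    exact max_min_arrays_core a b c dr x y z tr
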